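-- pv_equiv track=rewrite | github.com/Connor-Codess/CSAS | curling_cv/app.py | _stone_count_label
-- ===== SOURCE A (Python) =====
-- def _stone_count_label(stones):
--     r = sum(1 for s in stones if s.get('team') == 1)
--     y = sum(1 for s in stones if s.get('team') == 2)
--     u = sum(1 for s in stones if s.get('team') is None)
--     parts = [f"🔴 {r} red", f"🟡 {y} yellow"]
--     if u:
--         parts.append(f"⬜ {u} unknown")
--     return "  |  ".join(parts)
-- ===== SOURCE B (Python) =====
-- def _stone_count_label(stones):
--     r = y = u = 0
--     for s in stones:
--         t = s.get('team')
--         if t == 1: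
--             r += 1
--         elif t == 2:
--             y += 1
--         elif t is None:
--             u += 1
--     parts = [f"🔴 {r} red", f"🟡 {y} yellow"]
--     if u:
--         parts.append(f"⬜ {u} unknown")
--     return "  |  ".join(parts)
-- ===== Notes on version B (the rewrite author's own statement) =====
-- stated objective: simpler
-- what changed: Replaces three separate generator scans over stones (one per team value) with a single pass maintaining three counters in one loop.
import Mathlib
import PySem

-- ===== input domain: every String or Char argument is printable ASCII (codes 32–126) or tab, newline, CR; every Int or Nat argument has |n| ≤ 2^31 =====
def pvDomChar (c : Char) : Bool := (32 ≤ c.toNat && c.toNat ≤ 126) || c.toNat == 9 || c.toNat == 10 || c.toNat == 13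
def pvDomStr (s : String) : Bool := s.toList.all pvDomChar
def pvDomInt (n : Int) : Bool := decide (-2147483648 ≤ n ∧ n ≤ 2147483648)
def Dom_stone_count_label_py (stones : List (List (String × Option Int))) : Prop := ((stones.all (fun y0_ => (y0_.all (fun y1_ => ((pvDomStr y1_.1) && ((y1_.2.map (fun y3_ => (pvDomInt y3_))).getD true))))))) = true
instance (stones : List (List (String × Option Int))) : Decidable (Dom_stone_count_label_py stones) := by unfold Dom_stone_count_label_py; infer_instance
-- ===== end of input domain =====

-- B replaces A's three separate scans over `stones` with a single pass keeping three counters.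
-- ===== PORT A =====
-- Python dict argument = association list; lookup via PySem.Dict.ofList (last duplicate key wins, as in Python).
def pvGetTeam (s : List (String × Option Int)) : Option Int :=
  ((PySem.Dict.ofList s).get? "team").getD none

def stone_count_label_py (stones : List (List (String × Option Int))) : String :=
  let r : Int := (stones.countP (fun s => pvGetTeam s == some 1) : Nat)
  let y : Int := (stones.countP (fun s => pvGetTeam s == some 2) : Nat)
  let u : Int := (stones.countP (fun s => pvGetTeam s == none) : Nat)
  let parts : List String := ["🔴 " ++ PySem.Int.toStr r ++ " red", "🟡 " ++ PySem.Int.toStr y ++ " yellow"]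
  let parts := if u ≠ 0 then parts ++ ["⬜ " ++ PySem.Int.toStr u ++ " unknown"] else parts
  PySem.Str.join "  |  " parts

-- ===== PORT B =====
def pvTallyB (stones : List (List (String × Option Int))) : Int × Int × Int :=
  stones.foldl (fun (acc : Int × Int × Int) s =>
    let t := pvGetTeam s
    if t == some 1 then (acc.1 + 1, acc.2.1, acc.2.2)
    else if t == some 2 then (acc.1, acc.2.1 + 1, acc.2.2)
    else if t == none then (acc.1, acc.2.1, acc.2.2 + 1)
    else acc) (0, 0, 0)

def stone_count_label_py_alt (stones : List (List (String × Option Int))) : String :=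
  let c := pvTallyB stones
  let parts : List String := ["🔴 " ++ PySem.Int.toStr c.1 ++ " red", "🟡 " ++ PySem.Int.toStr c.2.1 ++ " yellow"]
  let parts := if c.2.2 ≠ 0 then parts ++ ["⬜ " ++ PySem.Int.toStr c.2.2 ++ " unknown"] else parts
  PySem.Str.join "  |  " parts

-- ===== PRECONDITION & SPEC =====
def Spec_stone_count_label_py (stones : List (List (String × Option Int))) (out : String) : Prop := out = stone_count_label_py_alt stones
instance (stones : List (List (String × Option Int))) (out : String) : Decidable (Spec_stone_count_label_py stones out) := by unfold Spec_stone_count_label_py; infer_instance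

-- ===== CLAIM (what is proved, stated in full; the proofs are below) =====
def Claim_equal_stone_count_label_py : Prop := ∀ (stones : List (List (String × Option Int))), Dom_stone_count_label_py stones → Spec_stone_count_label_py stones (stone_count_label_py stones)

-- ===== LEMMAS AND PROOFS =====
theorem pvTallyB_foldl (stones : List (List (String × Option Int))) (acc : Int × Int × Int) :
    stones.foldl (fun (acc : Int × Int × Int) s =>
      let t := pvGetTeam s
      if t == some 1 then (acc.1 + 1, acc.2.1, acc.2.2)
      else if t == some 2 then (acc.1, acc.2.1 + 1, acc.2.2)
      else if t == none then (acc.1, acc.2.1, acc.2.2 + 1)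
      else acc) acc
    = (acc.1 + (stones.countP (fun s => pvGetTeam s == some 1) : Nat),
       acc.2.1 + (stones.countP (fun s => pvGetTeam s == some 2) : Nat),
       acc.2.2 + (stones.countP (fun s => pvGetTeam s == none) : Nat)) := by
  induction stones generalizing acc with
  | nil => simp [List.countP]
  | cons s rest ih =>
      simp only [List.foldl_cons, List.countP_cons, ih]
      rcases h : pvGetTeam s with _ | t
      · simp; omega
      · by_cases h1 : t = 1
        · subst h1; simp; omega
        · by_cases h2 : t = 2
          · subst h2; simp; omega
          · simp [h1, h2]

theorem pvTallyB_eq (stones : List (List (String × Option Int))) :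
    pvTallyB stones =
      (((stones.countP (fun s => pvGetTeam s == some 1) : Nat) : Int),
       ((stones.countP (fun s => pvGetTeam s == some 2) : Nat) : Int),
       ((stones.countP (fun s => pvGetTeam s == none) : Nat) : Int)) := by
  unfold pvTallyB
  rw [pvTallyB_foldl]
  simp

-- ===== VERDICT (by name: the statement is the Claim_ definition above) =====
theorem stone_count_label_py_spec : Claim_equal_stone_count_label_py := by
  intro stones _
  unfold Spec_stone_count_label_py stone_count_label_py stone_count_label_py_alt
  rw [pvTallyB_eq]
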